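-- pv_equiv track=rewrite | github.com/MatthewK98/Blackjack-Project | Blackjack.py | show_winner
-- ===== SOURCE A (Python) =====
-- def show_winner(players):
-- 	best = 0
-- 	best_player = None #Incase everyone is bust
-- 	for idx, player in enumerate(players):
-- 		current_score = score(player)
-- 		if current_score <= 21 and current_score > best:
-- 			best = current_score
-- 			best_player = idx
-- 	return best_player
--
-- def score(hand):
--
-- 	total = 0
-- 	ace = 0
-- 	for card in hand:
-- 		if card == "Ace":
-- 			ace += 1
-- 			total += 11
-- 		elif card in ("Jack","King","Queen"):
-- 			total += 10
-- 		else: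
-- 			total += int(card)
-- 	while total > 21  and ace > 0:
-- 		total -= 10
-- 		ace -= 1
-- 	return total
-- ===== SOURCE B (Python) =====
-- def score(hand):
--     total = sum(11 if c == "Ace" else 10 if c in ("Jack", "King", "Queen") else int(c) for c in hand)
--     aces = hand.count("Ace")
--     if total > 21:
--         total -= 10 * min(aces, (total - 22) // 10 + 1)
--     return total
--
-- def show_winner(players):
--     scores = [score(p) for p in players]
--     valid = [(s, i) for i, s in enumerate(scores) if 0 < s <= 21]
--     if not valid:
--         return None
--     return max(valid, key=lambda t: t[0])[1]
-- ===== Notes on version B (the rewrite author's own statement) =====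
-- stated objective: alternative
-- what changed: A's single running-best fold with a while-loop ace adjustment is replaced by a two-pass pipeline: score every hand once (with a closed-form ace adjustment instead of the while loop), then filter to valid scores and pick the first maximum via max().
import Mathlib
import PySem

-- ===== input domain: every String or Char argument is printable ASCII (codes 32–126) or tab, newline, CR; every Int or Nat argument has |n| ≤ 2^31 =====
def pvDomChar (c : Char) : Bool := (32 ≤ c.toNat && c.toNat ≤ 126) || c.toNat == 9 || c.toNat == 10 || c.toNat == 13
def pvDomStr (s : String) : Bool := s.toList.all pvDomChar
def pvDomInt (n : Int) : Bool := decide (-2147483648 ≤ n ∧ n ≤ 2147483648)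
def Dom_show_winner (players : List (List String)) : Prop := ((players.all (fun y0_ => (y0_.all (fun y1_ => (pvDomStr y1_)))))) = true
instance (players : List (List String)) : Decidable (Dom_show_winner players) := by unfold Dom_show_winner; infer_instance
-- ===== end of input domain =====

-- B replaces A's running-best fold and ace while-loop by a two-pass scores/filter/max selection
-- and a closed-form ace adjustment (objective: alternative decomposition, same cost).

-- ===== PORT A =====
-- int(card) raises ValueError on non-card strings; Pre_ excludes those, so the `.getD 0` junk value is never reached inside Pre_.
def pyScoreLoop (hand : List String) : Int × Int :=
  hand.foldl (fun st card =>
    if card == "Ace" then (st.1 + 11, st.2 + 1)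
    else if card == "Jack" || card == "King" || card == "Queen" then (st.1 + 10, st.2)
    else (st.1 + (PySem.Int.ofStr? card).getD 0, st.2)) (0, 0)

-- the `while total > 21 and ace > 0` loop
def pyScoreWhile (total ace : Int) : Int :=
  if 21 < total ∧ 0 < ace then pyScoreWhile (total - 10) (ace - 1) else total
termination_by ace.toNat
decreasing_by omega

def pyScore (hand : List String) : Int :=
  let st := pyScoreLoop hand
  pyScoreWhile st.1 st.2

def show_winner (players : List (List String)) : Option Int :=
  ((PySem.List.enumerate players 0).foldl
    (fun (st : Int × Option Int) p =>
      let cs := pyScore p.2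
      if cs ≤ 21 ∧ cs > st.1 then (cs, some p.1) else st)
    (0, none)).2

-- ===== PORT B =====
-- same `.getD 0` remark as in port A: int(c) raising is excluded by Pre_.
def cardVal (c : String) : Int :=
  if c == "Ace" then 11
  else if c == "Jack" || c == "King" || c == "Queen" then 10
  else (PySem.Int.ofStr? c).getD 0

def score_alt (hand : List String) : Int :=
  let total := (hand.map cardVal).sum
  let aces : Int := (PySem.List.count hand "Ace" : Nat)
  if 21 < total then total - 10 * min aces (PySem.Int.floordiv (total - 22) 10 + 1) else total

def show_winner_alt (players : List (List String)) : Option Int :=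
  let scores := players.map score_alt
  let valid := (PySem.List.enumerate scores 0).filterMap
      (fun p => if 0 < p.2 ∧ p.2 ≤ 21 then some (p.2, p.1) else none)
  match PySem.List.max? valid (fun t => t.1) with
  | none => none
  | some t => some t.2

-- ===== PRECONDITION & SPEC =====
-- Pre_ excludes exactly the inputs where Python A raises ValueError: a hand containing a
-- string that is neither a face card / "Ace" nor int()-parseable.
def Pre_show_winner (players : List (List String)) : Prop :=
  ∀ hand ∈ players, ∀ c ∈ hand,
    c = "Ace" ∨ c = "Jack" ∨ c = "King" ∨ c = "Queen" ∨ (PySem.Int.ofStr? c).isSome = true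
instance (players : List (List String)) : Decidable (Pre_show_winner players) := by
  unfold Pre_show_winner; infer_instance

def pvWitness_show_winner : List (List String) := [["Ace", "King"], ["5", "9", "Queen"], []]

def Spec_show_winner (players : List (List String)) (out : Option Int) : Prop := out = show_winner_alt players
instance (players : List (List String)) (out : Option Int) : Decidable (Spec_show_winner players out) := by unfold Spec_show_winner; infer_instance

-- ===== CLAIM (what is proved, stated in full; the proofs are below) =====
def Claim_equal_show_winner : Prop := ∀ (players : List (List String)), Dom_show_winner players → Pre_show_winner players → Spec_show_winner players (show_winner players)

-- ===== LEMMAS AND PROOFS =====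

-- closed form of the ace while-loop
theorem pyScoreWhile_closed (n : Nat) : ∀ t : Int,
    pyScoreWhile t (n : Int)
      = if 21 < t then t - 10 * min (n : Int) (PySem.Int.floordiv (t - 22) 10 + 1) else t := by
  induction n with
  | zero =>
    intro t
    rw [pyScoreWhile]
    have h10 : (0:Int) < 10 := by norm_num
    rw [PySem.Int.floordiv_eq_ediv_of_pos h10]
    split_ifs <;> omega
  | succ n ih =>
    intro t
    rw [pyScoreWhile]
    by_cases ht : 21 < t
    · rw [if_pos ⟨ht, by push_cast; omega⟩,
        show (((n + 1 : Nat) : Int)) - 1 = (n : Int) by push_cast; ring, ih,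
        if_pos ht]
      simp only [PySem.Int.floordiv_eq_ediv_of_pos (by norm_num : (0:Int) < 10)]
      split_ifs <;> push_cast <;> omega
    · rw [if_neg (by push_cast; omega), if_neg ht]

-- the (total, ace) fold computes (sum of card values, number of aces)
theorem pyScoreLoop_general (hand : List String) : ∀ st : Int × Int,
    hand.foldl (fun st card =>
      if card == "Ace" then (st.1 + 11, st.2 + 1)
      else if card == "Jack" || card == "King" || card == "Queen" then (st.1 + 10, st.2)
      else (st.1 + (PySem.Int.ofStr? card).getD 0, st.2)) st
    = (st.1 + (hand.map cardVal).sum, st.2 + ((PySem.List.count hand "Ace" : Nat) : Int)) := by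
  induction hand with
  | nil => intro st; simp [PySem.List.count]
  | cons c t ih =>
    intro st
    simp only [List.foldl_cons, List.map_cons, List.sum_cons, PySem.List.count, List.count_cons]
    by_cases h1 : (c == "Ace") = true
    · rw [if_pos h1, ih]
      simp only [cardVal, h1, if_true, Prod.ext_iff]
      constructor <;> (try simp only [PySem.List.count]) <;> push_cast <;> ring
    · rw [if_neg h1]
      by_cases h3 : (c == "Jack" || c == "King" || c == "Queen") = true
      · rw [if_pos h3, ih]
        simp only [cardVal, h1, h3, Bool.false_eq_true, if_false, if_true, Prod.ext_iff]
        constructor <;> (try simp only [PySem.List.count]) <;> push_cast <;> ring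
      · rw [if_neg h3, ih]
        simp only [cardVal, h1, h3, Bool.false_eq_true, if_false, Prod.ext_iff]
        constructor <;> (try simp only [PySem.List.count]) <;> push_cast <;> ring

theorem pyScoreLoop_eq (hand : List String) :
    pyScoreLoop hand = ((hand.map cardVal).sum, ((PySem.List.count hand "Ace" : Nat) : Int)) := by
  unfold pyScoreLoop
  rw [pyScoreLoop_general]
  simp

-- the two score functions agree on every hand
theorem score_eq (hand : List String) : pyScore hand = score_alt hand := by
  unfold pyScore score_alt
  rw [pyScoreLoop_eq]
  exact pyScoreWhile_closed (PySem.List.count hand "Ace") ((hand.map cardVal).sum)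

-- first-maximum fold with a running accumulator
def gmax (m : Int × Int) (L : List (Int × Int)) : Int × Int :=
  L.foldl (fun m x => if m.1 < x.1 then x else m) m

theorem max?_eq_gmax (L : List (Int × Int)) : ∀ x : Int × Int,
    PySem.List.max? (x :: L) (fun t => t.1) = some (gmax x L) := by
  induction L with
  | nil => intro x; rfl
  | cons y L ih =>
    intro x
    have h1 : PySem.List.max? (x :: y :: L) (fun t => t.1)
        = PySem.List.max? ((if x.1 < y.1 then y else x) :: L) (fun t => t.1) := by
      simp only [PySem.List.max?, List.foldl_cons]
      by_cases h : x.1 < y.1 <;> simp [h]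
    rw [h1, ih]
    simp only [gmax, List.foldl_cons]

theorem gmax_filter (L : List (Int × Int)) : ∀ (x : Int × Int) (p : Int × Int → Bool),
    (∀ y ∈ L, p y = false → y.1 ≤ x.1) → gmax x (L.filter p) = gmax x L := by
  induction L with
  | nil => intro x p _; rfl
  | cons y L ih =>
    intro x p hp
    by_cases hy : p y
    · simp only [List.filter_cons, hy, if_pos, gmax, List.foldl_cons]
      by_cases h : x.1 < y.1
      · simp only [h, if_pos]
        exact ih y p (fun z hz hzp => le_trans (hp z (List.mem_cons_of_mem _ hz) hzp) (le_of_lt h))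
      · simp only [h, ite_false]
        exact ih x p (fun z hz hzp => hp z (List.mem_cons_of_mem _ hz) hzp)
    · have hy' : p y = false := by simpa using hy
      have hle : y.1 ≤ x.1 := hp y (List.mem_cons_self) hy'
      simp only [List.filter_cons, hy', gmax, List.foldl_cons, if_neg (not_lt.mpr hle)]
      simp only [Bool.false_eq_true, if_false]
      exact ih x p (fun z hz hzp => hp z (List.mem_cons_of_mem _ hz) hzp)

theorem gmax_eq_max?_filter (L : List (Int × Int)) : ∀ x : Int × Int,
    gmax x L = (PySem.List.max? (L.filter (fun y => x.1 < y.1)) (fun t => t.1)).getD x := by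
  induction L with
  | nil => intro x; rfl
  | cons y L ih =>
    intro x
    by_cases h : x.1 < y.1
    · have hfil : (y :: L).filter (fun z => decide (x.1 < z.1)) = y :: L.filter (fun z => decide (x.1 < z.1)) := by
        simp [h]
      simp only [gmax, List.foldl_cons, if_pos h]
      rw [hfil, max?_eq_gmax, Option.getD_some]
      have : gmax y (L.filter (fun z => decide (x.1 < z.1))) = gmax y L := by
        apply gmax_filter
        intro z _ hz
        simp at hz
        omega
      rw [this]; rfl
    · have hfil : (y :: L).filter (fun z => decide (x.1 < z.1)) = L.filter (fun z => decide (x.1 < z.1)) := by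
        simp [h]
      simp only [gmax, List.foldl_cons, if_neg h]
      rw [hfil]
      exact ih x

-- A's selection loop, as a function of the threshold and current holder
def sel (b : Int) (o : Option Int) : List (Int × List String) → Option Int
  | [] => o
  | (k, h) :: t =>
    if score_alt h ≤ 21 ∧ score_alt h > b then sel (score_alt h) (some k) t else sel b o t

def vals (b : Int) (E : List (Int × List String)) : List (Int × Int) :=
  E.filterMap (fun p => if b < score_alt p.2 ∧ score_alt p.2 ≤ 21 then some (score_alt p.2, p.1) else none)

theorem vals_filter (t : List (Int × List String)) (b s : Int) (hbs : b < s) :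
    (vals b t).filter (fun y => decide (s < y.1)) = vals s t := by
  unfold vals
  rw [List.filter_filterMap]
  congr 1
  funext p
  by_cases h1 : b < score_alt p.2 ∧ score_alt p.2 ≤ 21 <;>
    by_cases h2 : s < score_alt p.2 <;>
      (simp [h1, h2, Option.filter]; try omega)

theorem sel_eq_max (E : List (Int × List String)) : ∀ (b : Int) (o : Option Int),
    sel b o E = match PySem.List.max? (vals b E) (fun t => t.1) with
                | none => o
                | some r => some r.2 := by
  induction E with
  | nil => intro b o; rfl
  | cons p t ih =>
    obtain ⟨k, h⟩ := p
    intro b o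
    by_cases hc : score_alt h ≤ 21 ∧ score_alt h > b
    · rw [sel, if_pos hc, ih]
      have hv : vals b ((k, h) :: t) = (score_alt h, k) :: vals b t := by
        unfold vals
        rw [List.filterMap_cons, if_pos ⟨hc.2, hc.1⟩]
      rw [hv, max?_eq_gmax, gmax_eq_max?_filter]
      have hf : (vals b t).filter (fun y => decide ((score_alt h, k).1 < y.1)) = vals (score_alt h) t :=
        vals_filter t b (score_alt h) hc.2
      rw [hf]
      cases PySem.List.max? (vals (score_alt h) t) (fun t => t.1) <;> simp
    · rw [sel, if_neg hc, ih]
      have hv : vals b ((k, h) :: t) = vals b t := by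
        unfold vals
        rw [List.filterMap_cons, if_neg (by tauto)]
      rw [hv]

theorem showA_eq_sel (E : List (Int × List String)) : ∀ (b : Int) (o : Option Int),
    (E.foldl (fun (st : Int × Option Int) p =>
      let cs := pyScore p.2
      if cs ≤ 21 ∧ cs > st.1 then (cs, some p.1) else st) (b, o)).2 = sel b o E := by
  induction E with
  | nil => intro b o; rfl
  | cons p t ih =>
    obtain ⟨k, h⟩ := p
    intro b o
    simp only [List.foldl_cons]
    rw [score_eq]
    by_cases hc : score_alt h ≤ 21 ∧ score_alt h > b
    · rw [if_pos hc, ih, sel, if_pos hc]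
    · rw [if_neg hc, ih, sel, if_neg hc]

theorem valid_eq_vals (players : List (List String)) : ∀ k : Int,
    (PySem.List.enumerate (players.map score_alt) k).filterMap
      (fun p => if 0 < p.2 ∧ p.2 ≤ 21 then some (p.2, p.1) else none)
    = vals 0 (PySem.List.enumerate players k) := by
  induction players with
  | nil => intro k; rfl
  | cons h t ih =>
    intro k
    have hv := ih (k + 1)
    unfold vals at hv ⊢
    simp only [List.map_cons, PySem.List.enumerate_cons, List.filterMap_cons, hv]

-- ===== VERDICT (by name: the statement is the Claim_ definition above) =====
theorem show_winner_spec : Claim_equal_show_winner := by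
  intro players _ _
  unfold Spec_show_winner show_winner show_winner_alt
  simp only [showA_eq_sel, sel_eq_max, valid_eq_vals]
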